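-- pv_equiv track=rewrite | github.com/tommoseley/TheCombine | app/core/secret_detector.py | char_class_count
-- ===== SOURCE A (Python) =====
-- def char_class_count(s: str) -> int:
--     """Count character classes present (lowercase, uppercase, digit, special)."""
--     has_lower = has_upper = has_digit = has_special = False
--     for c in s:
--         if c.islower():
--             has_lower = True
--         elif c.isupper():
--             has_upper = True
--         elif c.isdigit():
--             has_digit = True
--         else:
--             has_special = True
--     return sum([has_lower, has_upper, has_digit, has_special])
-- ===== SOURCE B (Python) =====
-- def char_class_count(s: str) -> int:
--     """Count character classes present (lowercase, uppercase, digit, special)."""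
--     return (any(c.islower() for c in s)
--             + any(c.isupper() for c in s)
--             + any(c.isdigit() for c in s)
--             + any(not (c.islower() or c.isupper() or c.isdigit()) for c in s))
-- ===== Notes on version B (the rewrite author's own statement) =====
-- stated objective: idiomatic
-- what changed: Replaces A's single fused loop with four elif-updated flags by four independent short-circuiting any() scans whose boolean results are summed directly.
import Mathlib
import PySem

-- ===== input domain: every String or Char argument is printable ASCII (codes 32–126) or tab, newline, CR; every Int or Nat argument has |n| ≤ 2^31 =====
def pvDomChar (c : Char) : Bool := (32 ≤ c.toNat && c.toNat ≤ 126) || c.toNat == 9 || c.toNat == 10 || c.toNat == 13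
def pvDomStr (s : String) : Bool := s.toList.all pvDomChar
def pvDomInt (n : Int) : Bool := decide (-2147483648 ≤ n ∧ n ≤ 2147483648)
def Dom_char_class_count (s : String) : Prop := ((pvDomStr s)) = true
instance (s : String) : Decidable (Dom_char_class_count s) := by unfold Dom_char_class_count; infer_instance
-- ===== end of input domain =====

-- B replaces A's single fused flag-updating loop by four independent any-scans, one per class (idiomatic decomposition, same O(n) cost).


-- ===== PORT A =====
-- the four flags (has_lower, has_upper, has_digit, has_special), updated by the elif chain
def cccStep (fl : Bool × Bool × Bool × Bool) (c : Char) : Bool × Bool × Bool × Bool :=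
  if PySem.Chars.islower c then (true, fl.2.1, fl.2.2.1, fl.2.2.2)
  else if PySem.Chars.isupper c then (fl.1, true, fl.2.2.1, fl.2.2.2)
  else if PySem.Chars.isdigit c then (fl.1, fl.2.1, true, fl.2.2.2)
  else (fl.1, fl.2.1, fl.2.2.1, true)

def char_class_count (s : String) : Int :=
  let fl := s.toList.foldl cccStep (false, false, false, false)
  (if fl.1 then (1 : Int) else 0) + (if fl.2.1 then 1 else 0)
    + (if fl.2.2.1 then 1 else 0) + (if fl.2.2.2 then 1 else 0)

-- ===== PORT B =====
def char_class_count_alt (s : String) : Int :=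
  (if s.toList.any (fun c => PySem.Chars.islower c) then (1 : Int) else 0)
    + (if s.toList.any (fun c => PySem.Chars.isupper c) then 1 else 0)
    + (if s.toList.any (fun c => PySem.Chars.isdigit c) then 1 else 0)
    + (if s.toList.any (fun c =>
        !(PySem.Chars.islower c || PySem.Chars.isupper c || PySem.Chars.isdigit c)) then 1 else 0)

-- ===== PRECONDITION & SPEC =====
def Spec_char_class_count (s : String) (out : Int) : Prop := out = char_class_count_alt s
instance (s : String) (out : Int) : Decidable (Spec_char_class_count s out) := by unfold Spec_char_class_count; infer_instance

-- ===== CLAIM (what is proved, stated in full; the proofs are below) =====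
def Claim_equal_char_class_count : Prop := ∀ (s : String), Dom_char_class_count s → Spec_char_class_count s (char_class_count s)

-- ===== LEMMAS AND PROOFS =====

-- the classes are mutually exclusive (they are disjoint ASCII ranges)
theorem ccc_lower_not_upper (c : Char) (h : PySem.Chars.islower c = true) :
    PySem.Chars.isupper c = false := by
  simp only [PySem.Chars.islower, PySem.Chars.isupper, Char.le_def, UInt32.le_iff_toNat_le,
    Bool.and_eq_true, decide_eq_true_eq, Bool.and_eq_false_iff, decide_eq_false_iff_not, not_le,
    show 'a'.val.toNat = 97 from rfl, show 'z'.val.toNat = 122 from rfl,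
    show 'A'.val.toNat = 65 from rfl, show 'Z'.val.toNat = 90 from rfl,
    show '0'.val.toNat = 48 from rfl, show '9'.val.toNat = 57 from rfl] at *
  omega

theorem ccc_lower_not_digit (c : Char) (h : PySem.Chars.islower c = true) :
    PySem.Chars.isdigit c = false := by
  simp only [PySem.Chars.islower, PySem.Chars.isdigit, Char.le_def, UInt32.le_iff_toNat_le,
    Bool.and_eq_true, decide_eq_true_eq, Bool.and_eq_false_iff, decide_eq_false_iff_not, not_le,
    show 'a'.val.toNat = 97 from rfl, show 'z'.val.toNat = 122 from rfl,
    show 'A'.val.toNat = 65 from rfl, show 'Z'.val.toNat = 90 from rfl,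
    show '0'.val.toNat = 48 from rfl, show '9'.val.toNat = 57 from rfl] at *
  omega

theorem ccc_upper_not_digit (c : Char) (h : PySem.Chars.isupper c = true) :
    PySem.Chars.isdigit c = false := by
  simp only [PySem.Chars.isupper, PySem.Chars.isdigit, Char.le_def, UInt32.le_iff_toNat_le,
    Bool.and_eq_true, decide_eq_true_eq, Bool.and_eq_false_iff, decide_eq_false_iff_not, not_le,
    show 'a'.val.toNat = 97 from rfl, show 'z'.val.toNat = 122 from rfl,
    show 'A'.val.toNat = 65 from rfl, show 'Z'.val.toNat = 90 from rfl,
    show '0'.val.toNat = 48 from rfl, show '9'.val.toNat = 57 from rfl] at *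
  omega

-- loop invariant: the foldl flags are the initial flags OR-ed with the per-class any-scans
theorem ccc_foldl_inv (l : List Char) (fl : Bool × Bool × Bool × Bool) :
    l.foldl cccStep fl =
      (fl.1 || l.any (fun c => PySem.Chars.islower c),
       fl.2.1 || l.any (fun c => PySem.Chars.isupper c),
       fl.2.2.1 || l.any (fun c => PySem.Chars.isdigit c),
       fl.2.2.2 || l.any (fun c =>
         !(PySem.Chars.islower c || PySem.Chars.isupper c || PySem.Chars.isdigit c))) := by
  induction l generalizing fl with
  | nil => simp
  | cons c t ih =>
    simp only [List.foldl_cons, List.any_cons, ih, cccStep]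
    rcases hl : PySem.Chars.islower c with _ | _
    · rcases hu : PySem.Chars.isupper c with _ | _
      · rcases hd : PySem.Chars.isdigit c with _ | _
        · simp [Bool.or_assoc]
        · simp [hd, Bool.or_assoc]
      · simp [ccc_upper_not_digit c hu, Bool.or_assoc]
    · simp [ccc_lower_not_upper c hl, ccc_lower_not_digit c hl, Bool.or_assoc]

-- ===== VERDICT (by name: the statement is the Claim_ definition above) =====
theorem char_class_count_spec : Claim_equal_char_class_count := by
  intro s _
  show _ = _
  simp [char_class_count, char_class_count_alt, ccc_foldl_inv]
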